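-- pv_equiv track=rewrite | github.com/biocore/labadmin | knimin/lib/util.py | get_printout_data
-- ===== SOURCE A (Python) =====
-- def get_printout_data(kitinfo):
--     """Produce the text for paper slips with kit credentials & mapping table
--     """
--     BASE_PRINTOUT_TEXT = """Thank you for participating in the American Gut \
-- Project! Below you will find your sample barcodes (the numbers that \
-- anonymously link your samples to you) and your login credentials. It is very \
-- important that you login before you begin any sample collection.
--
-- Please login at: http://www.microbio.me/AmericanGut
--
-- Thanks,
-- The American Gut Project
-- """
--     kit_id = 0
--     password = 1
--     bcs = 3
--
--     text = []
--     for kit in kitinfo: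
--         text.append(BASE_PRINTOUT_TEXT)
--         barcodes = kit[bcs]
--
--         padding_lines = 5
--
--         if len(barcodes) > 5:
--             text.append("Sample Barcodes:\t%s" % ', '.join(barcodes[:5]))
--             for i in range(len(barcodes))[5::5]:
--                 padding_lines -= 1
--                 text.append("\t\t\t%s" % ', '.join(barcodes[i:i + 5]))
--         else:
--             text.append("Sample Barcodes:\t%s" % ', '.join(barcodes))
--
--         text.append("Kit ID:\t\t%s" % kit[kit_id])
--         text.append("Password:\t\t%s" % kit[password])
--
--         # padding between sheets so they print pretty
--         for i in range(padding_lines):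
--             text.append('')
--
--     return '\n'.join(text)
-- ===== SOURCE B (Python) =====
-- def get_printout_data(kitinfo):
--     """Produce the text for paper slips with kit credentials & mapping table
--     """
--     BASE_PRINTOUT_TEXT = """Thank you for participating in the American Gut \
-- Project! Below you will find your sample barcodes (the numbers that \
-- anonymously link your samples to you) and your login credentials. It is very \
-- important that you login before you begin any sample collection.
--
-- Please login at: http://www.microbio.me/AmericanGut
--
-- Thanks,
-- The American Gut Project
-- """
--     out = []
--     for kit in kitinfo:
--         block = [BASE_PRINTOUT_TEXT]
--         # consume the barcode list five at a time (no index arithmetic)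
--         prefix = "Sample Barcodes:\t"
--         bcs = kit[3]
--         while True:
--             block.append(prefix + ", ".join(bcs[:5]))
--             bcs = bcs[5:]
--             if not bcs:
--                 break
--             prefix = "\t\t\t"
--         block.append("Kit ID:\t\t%s" % kit[0])
--         block.append("Password:\t\t%s" % kit[1])
--         # pad each sheet to a fixed 9-line height so they print pretty
--         while len(block) < 9:
--             block.append('')
--         out.extend(block)
--     return '\n'.join(out)
-- ===== Notes on version B (the rewrite author's own statement) =====
-- stated objective: simpler
-- what changed: Replaces A's len>5 branch, index-based inner slicing loop and mutable padding counter by a list-consuming loop (emit first five, rebind to the rest until empty) and a pad-to-fixed-height step (append blanks while the sheet has fewer than 9 lines), so no branch on list length, no indices and no counter are needed.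
import Mathlib
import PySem

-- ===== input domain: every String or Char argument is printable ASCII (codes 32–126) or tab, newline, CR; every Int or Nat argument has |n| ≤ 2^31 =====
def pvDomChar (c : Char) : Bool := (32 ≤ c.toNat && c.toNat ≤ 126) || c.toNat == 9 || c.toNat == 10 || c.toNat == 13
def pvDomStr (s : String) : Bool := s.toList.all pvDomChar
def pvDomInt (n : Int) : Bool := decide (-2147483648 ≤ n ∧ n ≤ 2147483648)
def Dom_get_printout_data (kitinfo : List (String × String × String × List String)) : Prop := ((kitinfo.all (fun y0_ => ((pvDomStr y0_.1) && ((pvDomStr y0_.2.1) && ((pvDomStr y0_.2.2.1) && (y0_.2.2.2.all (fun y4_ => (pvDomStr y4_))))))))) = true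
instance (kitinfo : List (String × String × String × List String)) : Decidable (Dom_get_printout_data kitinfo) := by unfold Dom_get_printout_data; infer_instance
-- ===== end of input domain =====

-- B replaces A's len>5 branch, index-slice inner loop and mutable padding counter by a
-- list-consuming emit-five/rebind-to-rest loop and a pad-to-fixed-9-line-height step
-- (objective: simpler; same cost).

-- shared string constant (the Python BASE_PRINTOUT_TEXT literal, identical in Source A and Source B)
def pvBASE : String := "Thank you for participating in the American Gut Project! Below you will find your sample barcodes (the numbers that anonymously link your samples to you) and your login credentials. It is very important that you login before you begin any sample collection.\n\nPlease login at: http://www.microbio.me/AmericanGut\n\nThanks,\nThe American Gut Project\n"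

-- ===== PORT A =====
-- one iteration of A's `for kit in kitinfo` loop over the accumulator `text`
def pvAKit (text : List String) (kit : String × String × String × List String) : List String :=
  let text1 := text ++ [pvBASE]
  let barcodes := kit.2.2.2
  -- (padding_lines, text) after the barcode-lines part
  let st :=
    if PySem.List.len barcodes > 5 then
      -- Python's range(len(barcodes))[5::5] IS the range object range(5, len(barcodes), 5)
      (PySem.List.pyRange 5 (PySem.List.len barcodes) 5).foldl
        (fun st i => (st.1 - 1,
          st.2 ++ ["\t\t\t" ++ PySem.Str.join ", " (PySem.List.slice barcodes (some i) (some (i + 5)))]))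
        ((5 : Int), text1 ++ ["Sample Barcodes:\t" ++ PySem.Str.join ", " (PySem.List.slice barcodes none (some 5))])
    else
      ((5 : Int), text1 ++ ["Sample Barcodes:\t" ++ PySem.Str.join ", " barcodes])
  let text2 := st.2 ++ ["Kit ID:\t\t" ++ kit.1] ++ ["Password:\t\t" ++ kit.2.1]
  (PySem.List.pyRange 0 st.1 1).foldl (fun t _ => t ++ [""]) text2

def get_printout_data (kitinfo : List (String × String × String × List String)) : String :=
  PySem.Str.join "\n" (kitinfo.foldl pvAKit [])

-- ===== PORT B =====
-- bcs[5:] as drop (cited by pvBarcodeLines' decreasing_by)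
lemma pvSliceDrop (l : List String) : PySem.List.slice l (some 5) none = l.drop 5 := by
  rw [PySem.List.slice_from _ (by norm_num : (0:Int) ≤ 5)]; rfl

-- Source B's inner `while True` loop: emit the first five barcodes, rebind to the rest, stop when empty
def pvBarcodeLines (pre : String) (bcs : List String) : List String :=
  let line := pre ++ PySem.Str.join ", " (PySem.List.slice bcs none (some 5))
  let rest := PySem.List.slice bcs (some 5) none
  if rest.isEmpty then [line] else line :: pvBarcodeLines "\t\t\t" rest
termination_by bcs.length
decreasing_by
  rename_i h
  simp only [List.isEmpty_iff] at h
  have h' : bcs.drop 5 ≠ [] := by rw [← pvSliceDrop]; exact h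
  rw [pvSliceDrop]
  have hp : 0 < (bcs.drop 5).length := List.length_pos_of_ne_nil h'
  simp only [List.length_drop] at hp ⊢
  omega

-- Source B's `while len(block) < 9: block.append('')`
def pvPadTo9 (block : List String) : List String :=
  if block.length < 9 then pvPadTo9 (block ++ [""]) else block
termination_by 9 - block.length
decreasing_by simp; omega

-- the lines Source B appends to `out` for one kit
def pvBBlock (kit : String × String × String × List String) : List String :=
  pvPadTo9 ((pvBASE :: pvBarcodeLines "Sample Barcodes:\t" kit.2.2.2)
    ++ ["Kit ID:\t\t" ++ kit.1, "Password:\t\t" ++ kit.2.1])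

def get_printout_data_alt (kitinfo : List (String × String × String × List String)) : String :=
  PySem.Str.join "\n" (kitinfo.foldl (fun out kit => out ++ pvBBlock kit) [])

-- ===== PRECONDITION & SPEC =====
def Spec_get_printout_data (kitinfo : List (String × String × String × List String)) (out : String) : Prop := out = get_printout_data_alt kitinfo
instance (kitinfo : List (String × String × String × List String)) (out : String) : Decidable (Spec_get_printout_data kitinfo out) := by unfold Spec_get_printout_data; infer_instance

-- ===== CLAIM (what is proved, stated in full; the proofs are below) =====
def Claim_equal_get_printout_data : Prop := ∀ (kitinfo : List (String × String × String × List String)), Dom_get_printout_data kitinfo → Spec_get_printout_data kitinfo (get_printout_data kitinfo)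

-- ===== LEMMAS AND PROOFS =====

-- bcs[:5] as take
lemma pvSliceTake (l : List String) : PySem.List.slice l none (some 5) = l.take 5 := by
  rw [PySem.List.slice_to _ (by norm_num : (0:Int) ≤ 5)]; rfl

-- range(a, b, s) for 0 < s, a < b starts with a
lemma pvPyRange_pos_cons (a b s : Int) (h : a < b) (hs : 0 < s) :
    PySem.List.pyRange a b s = a :: PySem.List.pyRange (a + s) b s := by
  rw [PySem.List.pyRange_of_pos _ _ hs, PySem.List.pyRange_of_pos _ _ hs]
  have hs' : s ≠ 0 := by omega
  by_cases h2 : a + s < b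
  · have key : (b - a + s - 1) / s = (b - (a + s) + s - 1) / s + 1 := by
      rw [show b - a + s - 1 = (b - (a + s) + s - 1) + 1 * s by ring,
        Int.add_mul_ediv_right _ _ hs']
    have hnn : 0 ≤ (b - (a + s) + s - 1) / s := Int.ediv_nonneg (by omega) (by omega)
    simp only [if_pos h, if_pos h2, key]
    rw [show ((b - (a + s) + s - 1) / s + 1).toNat = ((b - (a + s) + s - 1) / s).toNat + 1 by omega]
    rw [List.range_succ_eq_map]
    simp only [List.map_cons, List.map_map, Nat.cast_zero, mul_zero, add_zero]
    refine congrArg₂ _ rfl ?_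
    apply List.map_congr_left
    intro k _
    simp only [Function.comp_apply]
    push_cast
    ring
  · have key : (b - a + s - 1) / s = 1 := by
      rw [show b - a + s - 1 = (b - a - 1) + 1 * s by ring,
        Int.add_mul_ediv_right _ _ hs',
        Int.ediv_eq_zero_of_lt (by omega) (by omega)]
      norm_num
    simp [if_pos h, if_neg h2, key]

lemma pvPyRange_pos_nil (a b s : Int) (h : b ≤ a) (hs : 0 < s) :
    PySem.List.pyRange a b s = [] := by
  rw [PySem.List.pyRange_of_pos _ _ hs]
  simp [show ¬ a < b by omega]

-- shifting a positive-step range by its step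
lemma pvPyRange_shift (a b s : Int) (hs : 0 < s) :
    PySem.List.pyRange (a + s) b s = (PySem.List.pyRange a (b - s) s).map (· + s) := by
  rw [PySem.List.pyRange_of_pos _ _ hs, PySem.List.pyRange_of_pos _ _ hs]
  by_cases h : a < b - s
  · simp only [if_pos h, if_pos (by omega : a + s < b)]
    rw [show b - (a + s) + s - 1 = b - s - a + s - 1 by ring, List.map_map]
    apply List.map_congr_left
    intro k _
    simp only [Function.comp_apply]
    ring
  · simp [if_neg h, show ¬ (a + s < b) by omega]

-- A's inner barcode loop: counts down padding and maps the line builder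
lemma pvFoldA {α : Type} (g : Int → α) (l : List Int) (p : Int) (t : List α) :
    l.foldl (fun st i => (st.1 - 1, st.2 ++ [g i])) (p, t)
      = (p - l.length, t ++ l.map g) := by
  induction l generalizing p t with
  | nil => simp
  | cons x xs ih => simp [ih]; omega

-- A's padding loop appends p blank lines
lemma pvFoldBlank (p : Int) (t : List String) :
    (PySem.List.pyRange 0 p 1).foldl (fun t _ => t ++ [""]) t
      = t ++ List.replicate p.toNat "" := by
  rw [show (fun (t : List String) (_ : Int) => t ++ [""])
      = (fun t i => t ++ [(fun (_ : Int) => "") i]) from rfl]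
  rw [PySem.List.foldl_append_singleton_eq_map]
  congr 1
  rw [List.map_const']
  congr 1
  rw [PySem.List.length_pyRange_one]
  omega

-- B's padding loop pads to height 9
lemma pvPadTo9_eq (b : List String) :
    pvPadTo9 b = b ++ List.replicate (9 - b.length) "" := by
  by_cases h : b.length < 9
  · rw [pvPadTo9, if_pos h, pvPadTo9_eq (b ++ [""])]
    simp only [List.append_assoc, List.length_append, List.length_cons, List.length_nil]
    congr 1
    rw [show 9 - b.length = (9 - (b.length + 1)) + 1 by omega, List.replicate_succ]
    rfl
  · rw [pvPadTo9, if_neg h]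
    simp [show 9 - b.length = 0 by omega]
termination_by 9 - b.length
decreasing_by simp; omega

-- short tail: at most five barcodes give exactly one line
lemma pvBarcodeLines_short (pre : String) (bcs : List String) (h : bcs.length ≤ 5) :
    pvBarcodeLines pre bcs = [pre ++ PySem.Str.join ", " bcs] := by
  rw [pvBarcodeLines.eq_def]
  simp [pvSliceDrop, pvSliceTake, List.drop_eq_nil_of_le h, List.take_of_length_le h]

-- A's indexed inner loop produces exactly B's list-consuming lines on the tail
lemma pvAChunks : ∀ (n : Nat) (bcs : List String), bcs.length = n → 5 < n →
    (PySem.List.pyRange 5 (n : Int) 5).map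
      (fun i => "\t\t\t" ++ PySem.Str.join ", " (PySem.List.slice bcs (some i) (some (i + 5))))
      = pvBarcodeLines "\t\t\t" (bcs.drop 5) := by
  intro n
  induction n using Nat.strong_induction_on with
  | _ n ih =>
    intro bcs hlen h5
    rw [pvPyRange_pos_cons 5 (n : Int) 5 (by exact_mod_cast h5) (by norm_num)]
    rw [pvBarcodeLines.eq_def]
    simp only [pvSliceDrop, pvSliceTake, List.drop_drop]
    have hslice5 : PySem.List.slice bcs (some (5:Int)) (some (10:Int)) = (bcs.drop 5).take 5 := by
      rw [PySem.List.slice_toNat _ (by norm_num) (by norm_num)]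
      rfl
    by_cases hb : n ≤ 10
    · -- one trailing chunk
      rw [pvPyRange_pos_nil (5 + 5) (n : Int) 5 (by exact_mod_cast hb) (by norm_num)]
      have : (bcs.drop (5 + 5)).isEmpty = true := by
        simp [List.drop_eq_nil_of_le, hlen ▸ hb]
      simp [this, hslice5]
    · -- recurse on the tail
      have hrest : ¬ (bcs.drop (5 + 5)).isEmpty = true := by
        simp only [List.isEmpty_iff, ← List.length_eq_zero_iff.not, List.length_drop]
        omega
      rw [if_neg hrest]
      have hshift : PySem.List.pyRange (5 + 5) (n : Int) 5
          = (PySem.List.pyRange 5 ((n : Int) - 5) 5).map (· + 5) :=pvPyRange_shift 5 (n : Int) 5 (by norm_num)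
      have htail := ih (n - 5) (by omega) (bcs.drop 5) (by simp [hlen]) (by omega)
      have hcast : ((n - 5 : Nat) : Int) = (n : Int) - 5 := by omega
      rw [hcast] at htail
      rw [hshift]
      simp only [List.map_cons, List.map_map]
      congr 1
      · rw [show ((5:Int) + 5) = 10 by norm_num, hslice5]
      have hdd : List.drop (5 + 5) bcs = List.drop 5 (List.drop 5 bcs) := by
        simp [List.drop_drop]
      rw [hdd, ← htail]
      apply List.map_congr_left
      intro i hi
      have hi0 : 0 ≤ i := by
        have := ((PySem.List.mem_pyRange_iff_of_pos (by norm_num : (0:Int) < 5) i).mp hi).1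
        omega
      simp only [Function.comp_apply]
      congr 1
      have h1 : ((i:Int) + 5).toNat = i.toNat + 5 := by omega
      have h2 : ((i:Int) + 5 + 5).toNat = i.toNat + 10 := by omega
      rw [PySem.List.slice_toNat _ (by omega) (by omega),
        PySem.List.slice_toNat _ (by omega) (by omega), h1, h2, List.drop_drop]
      rw [show i.toNat + 10 - (i.toNat + 5) = i.toNat + 5 - i.toNat by omega,
        show i.toNat + 5 = 5 + i.toNat by omega]

-- per-kit agreement: one A iteration appends exactly B's padded block
lemma pvKitEq (t : List String) (kit : String × String × String × List String) :
    pvAKit t kit = t ++ pvBBlock kit := by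
  obtain ⟨kid, pw, sw, barcodes⟩ := kit
  unfold pvAKit pvBBlock
  simp only [PySem.List.len_eq]
  rw [pvPadTo9_eq]
  rcases Nat.lt_or_ge 5 barcodes.length with hgt | hle
  · -- more than 5 barcodes
    have h5 : (5 : Int) < (barcodes.length : Int) := by exact_mod_cast hgt
    rw [if_pos (by exact_mod_cast h5)]
    rw [pvFoldA, pvFoldBlank]
    rw [pvBarcodeLines.eq_def]
    have hrest : ¬ (PySem.List.slice barcodes (some 5) none).isEmpty = true := by
      rw [pvSliceDrop]
      simp only [List.isEmpty_iff, ← List.length_eq_zero_iff.not, List.length_drop]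
      omega
    rw [if_neg hrest, pvSliceDrop]
    rw [← pvAChunks barcodes.length barcodes rfl hgt]
    simp only [pvSliceTake, List.length_map, List.length_cons, List.length_append,
      List.length_map, List.length_nil]
    set L := (PySem.List.pyRange 5 (barcodes.length : Int) 5).length with hL
    have hpad : ((5 : Int) - (L : Int)).toNat = 9 - (1 + (1 + L) + 2) := by omega
    rw [hpad]
    simp [List.append_assoc]
    omega
  · -- at most 5 barcodes
    have h5 : ¬ ((5 : Int) < (barcodes.length : Int)) := by exact_mod_cast Nat.not_lt.mpr hle
    rw [if_neg (by exact_mod_cast h5)]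
    rw [pvFoldBlank, pvBarcodeLines_short _ _ hle]
    norm_num
    simp

-- the two whole-list folds agree
lemma pvFoldAll (ks : List (String × String × String × List String)) (t : List String) :
    ks.foldl pvAKit t = ks.foldl (fun out kit => out ++ pvBBlock kit) t := by
  induction ks generalizing t with
  | nil => rfl
  | cons k ks ih => simp only [List.foldl_cons, pvKitEq]; exact ih _

-- ===== VERDICT (by name: the statement is the Claim_ definition above) =====
theorem get_printout_data_spec : Claim_equal_get_printout_data := by
  intro kitinfo _
  unfold Spec_get_printout_data get_printout_data get_printout_data_alt
  congr 1
  exact pvFoldAll kitinfo []
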